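-- pv_equiv track=rewrite | github.com/sungin95/TIL | python/코드테스트(연습)/백준/22y12m/양궁대회_(help.용환).py | solution
-- ===== SOURCE A (Python) =====
-- def solution(n, info):
--     case = []
--     max_ = 0
--     # 자리수를 맞추기 위해 1024 ~ 2048
--     for i in range(1024, 2048):
--
--         # 1024가지의 라이온 경우의 수 중 1개
--         lie_list = list(map(int, reversed(str(bin(i))[3:])))
--         lie = 0
--         api = 0
--
--         # 화살갯수를 넘기면 넘기기 or 남으면 0에다 쏜걸로
--         n_check = 0
--         for j in range(10):
--             if lie_list[j] == 1:
--                 n_check += info[j] + 1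
--         if n < n_check:
--             continue
--         else:
--             lie_list.append(n - n_check)
--
--         # 라이온과 어피치 점수 계산
--         for j in range(10):
--             if lie_list[j] == 1:
--                 lie += 10 - j
--
--             elif info[j] != 0:
--                 api += 10 - j
--
--         # 라이온이 어피치보다 점수가 높고, max값이 값거나 클때 case 업데이트
--         if lie > api and lie - api >= max_:
--             max_ = lie - api
--             case = lie_list
--
--     # case 의 값에 따라 정답을 출력하도록 작업
--     answer = []
--     if case == []:
--         answer = [-1]
--     else:
--         for i in range(10):
--             if case[i] == 0:
--                 answer.append(0)
--             else:
--                 answer.append(info[i] + 1)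
--         else:
--             answer.append(case[10])
--
--     return answer
-- ===== SOURCE B (Python) =====
-- def solution(n, info):
--     # Recursive DFS over ring indices: decide for each ring (high score first)
--     # whether Lion outshoots Apeach there; evaluate each full assignment at the leaf.
--     best_delta = 0
--     best_case = None
--
--     def leaf(bits):
--         nonlocal best_delta, best_case
--         cost = sum(info[k] + 1 for k in range(10) if bits[k] == 1)
--         if cost > n:
--             return
--         lion = sum(10 - k for k in range(10) if bits[k] == 1)
--         ape = sum(10 - k for k in range(10) if bits[k] == 0 and info[k] != 0)
--         if lion > ape and lion - ape >= best_delta: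
--             best_delta = lion - ape
--             best_case = bits + [n - cost]
--
--     def go(j, bits):
--         # bits holds the decisions for rings j+1..9; prepend the decision for ring j.
--         if j == 0:
--             leaf(bits)
--         else:
--             go(j - 1, [0] + bits)
--             go(j - 1, [1] + bits)
--
--     go(10, [])
--     if best_case is None:
--         return [-1]
--     return [info[i] + 1 if best_case[i] == 1 else 0 for i in range(10)] + [best_case[10]]
-- ===== Notes on version B (the rewrite author's own statement) =====
-- stated objective: alternative
-- what changed: A enumerates all 1024 Lion assignments by decoding each integer 1024..2047 through its binary-string representation; B instead runs a recursive DFS over the ten ring indices (high-score ring outermost, skip-branch before take-branch, which reproduces A's largest-bitmask tie-break), evaluating each full assignment at the leaf.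
import Mathlib
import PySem

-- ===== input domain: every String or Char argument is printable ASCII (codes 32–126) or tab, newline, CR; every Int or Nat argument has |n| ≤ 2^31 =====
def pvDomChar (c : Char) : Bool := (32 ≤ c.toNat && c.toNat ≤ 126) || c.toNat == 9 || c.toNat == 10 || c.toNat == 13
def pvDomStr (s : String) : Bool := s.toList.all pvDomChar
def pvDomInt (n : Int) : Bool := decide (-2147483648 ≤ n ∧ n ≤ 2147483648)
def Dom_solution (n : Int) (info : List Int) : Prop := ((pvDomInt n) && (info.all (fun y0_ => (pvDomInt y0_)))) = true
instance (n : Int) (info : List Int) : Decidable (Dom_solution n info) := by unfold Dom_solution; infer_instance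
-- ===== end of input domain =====

-- B replaces A's decode-a-bitmask-from-a-binary-string loop by a recursive DFS over the
-- ten rings (objective: alternative; same asymptotic cost).

-- ===== PORT A =====
/-- Hand port of `list(map(int, reversed(str(bin(i))[3:])))` for `i ≥ 2`, exact there:
`binDigits i` is the binary expansion of `i` MSB-first as ints (`bin(i)` without the
`'0b'` prefix); the `[3:]` slice additionally drops the leading digit (done at the
call site via `.drop 1`). -/
def binDigits (k : Nat) : List Int :=
  if k < 2 then [(k : Int)] else binDigits (k / 2) ++ [((k % 2 : Nat) : Int)]
termination_by k
decreasing_by omega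

/-- body of A's per-`i` loop iteration, after `lie_list` has been computed -/
def aBody (n : Int) (info : List Int) (st : List Int × Int) (lie_list : List Int) :
    List Int × Int :=
  let n_check : Int := (List.range 10).foldl
    (fun acc j => if lie_list.getD j 0 == 1 then acc + (info.getD j 0 + 1) else acc) 0
  if n < n_check then st
  else
    let lie_list2 := lie_list ++ [n - n_check]
    let p := (List.range 10).foldl
      (fun (p : Int × Int) j =>
        if lie_list2.getD j 0 == 1 then (p.1 + (10 - (j : Int)), p.2)
        else if info.getD j 0 != 0 then (p.1, p.2 + (10 - (j : Int)))
        else p) (0, 0)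
    if p.2 < p.1 ∧ st.2 ≤ p.1 - p.2 then (lie_list2, p.1 - p.2) else st

def solution (n : Int) (info : List Int) : List Int :=
  let res := (List.range' 1024 1024).foldl
    (fun st i => aBody n info st (((binDigits i).drop 1).reverse)) ([], 0)
  if res.1 = [] then [-1]
  else ((List.range 10).foldl
      (fun acc i => acc ++ [if res.1.getD i 0 == 0 then (0 : Int) else info.getD i 0 + 1]) [])
    ++ [res.1.getD 10 0]

-- ===== PORT B =====
/-- B's `leaf`: evaluate one full assignment `bits` against the best found so far -/
def bLeaf (n : Int) (info : List Int) (bits : List Int) (st : Int × Option (List Int)) :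
    Int × Option (List Int) :=
  let cost : Int :=
    (((List.range 10).filter (fun k => bits.getD k 0 == 1)).map (fun k => info.getD k 0 + 1)).sum
  if n < cost then st
  else
    let lion : Int :=
      (((List.range 10).filter (fun k => bits.getD k 0 == 1)).map (fun (k : Nat) => 10 - (k : Int))).sum
    let ape : Int :=
      (((List.range 10).filter
          (fun k => bits.getD k 0 == 0 && info.getD k 0 != 0)).map (fun (k : Nat) => 10 - (k : Int))).sum
    if ape < lion ∧ st.1 ≤ lion - ape then (lion - ape, some (bits ++ [n - cost])) else st

/-- B's `go`: decide the rings one by one, high-score ring decided outermost -/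
def bGo (n : Int) (info : List Int) : Nat → List Int → Int × Option (List Int) → Int × Option (List Int)
  | 0, bits, st => bLeaf n info bits st
  | j + 1, bits, st => bGo n info j ((1 : Int) :: bits) (bGo n info j ((0 : Int) :: bits) st)

def solution_alt (n : Int) (info : List Int) : List Int :=
  match (bGo n info 10 [] (0, none)).2 with
  | none => [-1]
  | some bc =>
      ((List.range 10).map (fun i => if bc.getD i 0 == 1 then info.getD i 0 + 1 else (0 : Int)))
        ++ [bc.getD 10 0]

-- ===== PRECONDITION & SPEC =====
-- A indexes info[0..9]; on shorter lists the Python raises IndexError.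
def Pre_solution (n : Int) (info : List Int) : Prop := 10 ≤ info.length
instance (n : Int) (info : List Int) : Decidable (Pre_solution n info) := by
  unfold Pre_solution; infer_instance

def pvWitness_solution : Int × List Int := (5, [2, 1, 1, 1, 0, 0, 0, 0, 0, 0])

def Spec_solution (n : Int) (info : List Int) (out : List Int) : Prop := out = solution_alt n info
instance (n : Int) (info : List Int) (out : List Int) : Decidable (Spec_solution n info out) := by
  unfold Spec_solution; infer_instance

-- ===== CLAIM (what is proved, stated in full; the proofs are below) =====
def Claim_equal_solution : Prop := ∀ (n : Int) (info : List Int),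
  Dom_solution n info → Pre_solution n info → Spec_solution n info (solution n info)

-- ===== LEMMAS AND PROOFS =====

/-- binary digits of `m`, LSB first, padded to `d` digits -/
def lsbI : Nat → Nat → List Int
  | 0, _ => []
  | d + 1, m => ((m % 2 : Nat) : Int) :: lsbI d (m / 2)

/-- binary digits of `m`, MSB first, padded to `d` digits -/
def msbI : Nat → Nat → List Int
  | 0, _ => []
  | d + 1, m => msbI d (m / 2) ++ [((m % 2 : Nat) : Int)]

theorem lsbI_length (d m : Nat) : (lsbI d m).length = d := by
  induction d generalizing m with
  | zero => rfl
  | succ d ih => simp [lsbI, ih]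

theorem lsbI_mem (d m : Nat) : ∀ x ∈ lsbI d m, x = 0 ∨ x = 1 := by
  induction d generalizing m with
  | zero => simp [lsbI]
  | succ d ih =>
    intro x hx
    simp only [lsbI, List.mem_cons] at hx
    rcases hx with h | h
    · subst h
      have : m % 2 = 0 ∨ m % 2 = 1 := by omega
      rcases this with h | h <;> simp [h]
    · exact ih _ x h

theorem msbI_reverse (d m : Nat) : (msbI d m).reverse = lsbI d m := by
  induction d generalizing m with
  | zero => rfl
  | succ d ih => simp [msbI, lsbI, ih]

theorem binDigits_decode (d m : Nat) (h : m < 2 ^ d) :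
    binDigits (2 ^ d + m) = 1 :: msbI d m := by
  induction d generalizing m with
  | zero =>
    interval_cases m
    simp [binDigits, msbI]
  | succ d ih =>
    have h2 : (2 : Nat) ^ (d + 1) = 2 * 2 ^ d := by ring
    have hge : ¬ (2 ^ (d + 1) + m < 2) := by
      have : (1 : Nat) ≤ 2 ^ d := Nat.one_le_two_pow
      omega
    rw [binDigits, if_neg hge]
    have hq : (2 ^ (d + 1) + m) / 2 = 2 ^ d + m / 2 := by omega
    have hr : (2 ^ (d + 1) + m) % 2 = m % 2 := by omega
    have hm : m / 2 < 2 ^ d := by omega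
    rw [hq, hr, ih _ hm]
    simp [msbI]

theorem lsbI_low (j m : Nat) (h : m < 2 ^ j) : lsbI (j + 1) m = lsbI j m ++ [0] := by
  induction j generalizing m with
  | zero => interval_cases m; rfl
  | succ j ih =>
    have h2 : (2 : Nat) ^ (j + 1) = 2 * 2 ^ j := by ring
    have hm : m / 2 < 2 ^ j := by omega
    rw [show lsbI (j + 1 + 1) m = ((m % 2 : Nat) : Int) :: lsbI (j + 1) (m / 2) from rfl,
      ih _ hm]
    simp [lsbI]

theorem lsbI_high (j m : Nat) (h : m < 2 ^ j) :
    lsbI (j + 1) (2 ^ j + m) = lsbI j m ++ [1] := by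
  induction j generalizing m with
  | zero => interval_cases m; rfl
  | succ j ih =>
    have h2 : (2 : Nat) ^ (j + 1) = 2 * 2 ^ j := by ring
    have hq : (2 ^ (j + 1) + m) / 2 = 2 ^ j + m / 2 := by omega
    have hr : (2 ^ (j + 1) + m) % 2 = m % 2 := by omega
    have hm : m / 2 < 2 ^ j := by omega
    rw [show lsbI (j + 1 + 1) (2 ^ (j + 1) + m)
        = (((2 ^ (j + 1) + m) % 2 : Nat) : Int) :: lsbI (j + 1) ((2 ^ (j + 1) + m) / 2) from rfl,
      hq, hr, ih _ hm]
    simp [lsbI]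

theorem bGo_eq_foldl (n : Int) (info : List Int) (j : Nat) :
    ∀ (bits : List Int) (st : Int × Option (List Int)),
      bGo n info j bits st =
        (List.range (2 ^ j)).foldl (fun s m => bLeaf n info (lsbI j m ++ bits) s) st := by
  induction j with
  | zero => intro bits st; simp [bGo, lsbI, List.range_one]
  | succ j ih =>
    intro bits st
    have hsplit : (2 : Nat) ^ (j + 1) = 2 ^ j + 2 ^ j := by ring
    rw [bGo, ih, ih, hsplit, List.range_add, List.foldl_append, List.foldl_map]
    have h1 : (List.range (2 ^ j)).foldl (fun s m => bLeaf n info (lsbI j m ++ 0 :: bits) s) st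
        = (List.range (2 ^ j)).foldl (fun s m => bLeaf n info (lsbI (j + 1) m ++ bits) s) st := by
      apply PySem.List.foldl_congr_mem
      intro acc m hm
      rw [lsbI_low j m (List.mem_range.mp hm)]
      simp
    rw [h1]
    apply PySem.List.foldl_congr_mem
    intro acc m hm
    rw [lsbI_high j m (List.mem_range.mp hm)]
    simp

/-- conditional-accumulation fold = sum over the filtered list -/
theorem foldl_if_sum (c : Nat → Bool) (f : Nat → Int) (xs : List Nat) (a : Int) :
    xs.foldl (fun acc k => if c k then acc + f k else acc) a
      = a + ((xs.filter c).map f).sum := by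
  induction xs generalizing a with
  | nil => simp
  | cons x xs ih =>
    by_cases h : c x
    · simp [h, ih, add_assoc]
    · simp [h, ih]

/-- A's two-accumulator `lie`/`api` loop as a pair of filtered sums -/
theorem foldl_pair_sum (c1 c2 : Nat → Bool) (f g : Nat → Int) (xs : List Nat) (a b : Int) :
    xs.foldl (fun (p : Int × Int) j =>
        if c1 j then (p.1 + f j, p.2)
        else if c2 j then (p.1, p.2 + g j)
        else p) (a, b)
      = (a + ((xs.filter c1).map f).sum,
         b + ((xs.filter (fun j => !c1 j && c2 j)).map g).sum) := by
  induction xs generalizing a b with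
  | nil => simp
  | cons x xs ih =>
    by_cases h1 : c1 x
    · simp [h1, ih, add_assoc]
    · by_cases h2 : c2 x
      · simp [h1, h2, ih, add_assoc]
      · simp [h1, h2, ih]

theorem foldl_build_map (f : Nat → Int) (xs : List Nat) (acc : List Int) :
    xs.foldl (fun acc i => acc ++ [f i]) acc = acc ++ xs.map f := by
  induction xs generalizing acc with
  | nil => simp
  | cons x xs ih => simp [ih]

/-- relation between A's loop state and B's -/
def FSt (a : List Int × Int) : Int × Option (List Int) :=
  (a.2, if a.1 = [] then none else some a.1)

/-- invariant of A's `case` accumulator -/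
def GoodC (l : List Int) : Prop :=
  l = [] ∨ (l.length = 11 ∧ ∀ k, k < 10 → l.getD k 0 = 0 ∨ l.getD k 0 = 1)

theorem ite_pair_comm (n cost lion ape : Int) (newc : List Int) (hnewc : newc ≠ [])
    (a : List Int × Int) :
    (if n < cost then FSt a
     else if ape < lion ∧ (FSt a).1 ≤ lion - ape then (lion - ape, some newc) else FSt a)
    = FSt (if n < cost then a
           else if ape < lion ∧ a.2 ≤ lion - ape then (newc, lion - ape) else a) := by
  have hf : (FSt a).1 = a.2 := rfl
  rw [hf]
  by_cases h0 : n < cost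
  · simp [h0]
  · by_cases h1 : ape < lion ∧ a.2 ≤ lion - ape
    · simp [FSt, h0, h1, hnewc]
    · simp [h0, h1]

theorem step_comm (n : Int) (info : List Int) (bits : List Int)
    (hlen : bits.length = 10) (hb : ∀ x ∈ bits, x = 0 ∨ x = 1) (a : List Int × Int)
    (hg : GoodC a.1) :
    bLeaf n info bits (FSt a) = FSt (aBody n info a bits) ∧ GoodC (aBody n info a bits).1 := by
  simp only [aBody, bLeaf]
  rw [foldl_if_sum, foldl_pair_sum]
  simp only [zero_add]
  have hgd : ∀ (x : Int), ∀ j ∈ List.range 10,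
      ((bits ++ [x]).getD j 0 == 1) = (bits.getD j 0 == 1) := by
    intro x j hj
    rw [List.getD_append _ _ _ _ (by rw [hlen]; exact List.mem_range.mp hj)]
  have hfil1 : ∀ (x : Int),
      (List.range 10).filter (fun j => (bits ++ [x]).getD j 0 == 1)
        = (List.range 10).filter (fun j => bits.getD j 0 == 1) :=
    fun x => List.filter_congr (hgd x)
  have hfil2 : ∀ (x : Int),
      (List.range 10).filter (fun j => !((bits ++ [x]).getD j 0 == 1) && (info.getD j 0 != 0))
        = (List.range 10).filter (fun j => bits.getD j 0 == 0 && info.getD j 0 != 0) := by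
    intro x
    apply List.filter_congr
    intro j hj
    rw [hgd x j hj]
    have hjlt : j < bits.length := by rw [hlen]; exact List.mem_range.mp hj
    have hval : bits.getD j 0 = 0 ∨ bits.getD j 0 = 1 := by
      rw [List.getD_eq_getElem _ _ hjlt]
      exact hb _ (List.getElem_mem hjlt)
    have hval' : bits[j]?.getD 0 = 0 ∨ bits[j]?.getD 0 = 1 := by
      simpa [List.getD] using hval
    rcases hval' with h | h <;> simp [h]
  rw [hfil1, hfil2]
  have hgood2 : ∀ (x : Int), GoodC (bits ++ [x]) := by
    intro x
    right
    constructor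
    · simp [hlen]
    · intro k hk
      rw [List.getD_append _ _ _ _ (by omega), List.getD_eq_getElem _ _ (by omega)]
      exact hb _ (List.getElem_mem (by omega))
  constructor
  · refine ite_pair_comm n _ _ _ _ ?_ a
    simp
  · split_ifs
    · exact hg
    · exact hgood2 _
    · exact hg

theorem fold_comm (n : Int) (info : List Int) (L : List (List Int))
    (hL : ∀ bits ∈ L, bits.length = 10 ∧ ∀ x ∈ bits, x = 0 ∨ x = 1) :
    ∀ (a : List Int × Int), GoodC a.1 →
      L.foldl (fun s bits => bLeaf n info bits s) (FSt a)
          = FSt (L.foldl (fun s bits => aBody n info s bits) a)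
        ∧ GoodC (L.foldl (fun s bits => aBody n info s bits) a).1 := by
  induction L with
  | nil => intro a hg; exact ⟨rfl, hg⟩
  | cons x xs ih =>
    intro a hg
    have hx := hL x (by simp)
    have hxs : ∀ bits ∈ xs, bits.length = 10 ∧ ∀ y ∈ bits, y = 0 ∨ y = 1 :=
      fun bits hb => hL bits (List.mem_cons_of_mem _ hb)
    obtain ⟨hstep, hgood⟩ := step_comm n info x hx.1 hx.2 a hg
    simp only [List.foldl_cons, hstep]
    exact ih hxs _ hgood

-- ===== VERDICT (by name: the statement is the Claim_ definition above) =====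
theorem solution_spec : Claim_equal_solution := by
  intro n info _ _
  unfold Spec_solution solution solution_alt
  -- rewrite A's loop as a fold of `aBody` over the decoded bit lists
  have hdec : ∀ m ∈ List.range 1024,
      ((binDigits (1024 + m)).drop 1).reverse = lsbI 10 m := by
    intro m hm
    have hm' : m < 2 ^ 10 := List.mem_range.mp hm
    have : (1024 : Nat) + m = 2 ^ 10 + m := by norm_num
    rw [this, binDigits_decode 10 m hm']
    simp [msbI_reverse]
  have hA : (List.range' 1024 1024).foldl
      (fun st i => aBody n info st (((binDigits i).drop 1).reverse)) ([], 0)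
      = (List.range 1024).foldl (fun st m => aBody n info st (lsbI 10 m)) ([], 0) := by
    rw [List.range'_eq_map_range, List.foldl_map]
    exact PySem.List.foldl_congr_mem _ _ _ _ (fun acc m hm => by rw [hdec m hm])
  have hB : bGo n info 10 [] (0, none)
      = (List.range 1024).foldl (fun s m => bLeaf n info (lsbI 10 m) s) (0, none) := by
    rw [bGo_eq_foldl]
    have h1024 : (2 : Nat) ^ 10 = 1024 := by norm_num
    rw [h1024]
    exact PySem.List.foldl_congr_mem _ _ _ _ (fun acc m _ => by rw [List.append_nil])
  rw [hA, hB]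
  -- both folds over the same list of bit vectors
  have hmain := fold_comm n info ((List.range 1024).map (lsbI 10))
    (by
      intro bits hb
      obtain ⟨m, _, rfl⟩ := List.mem_map.mp hb
      exact ⟨lsbI_length 10 m, lsbI_mem 10 m⟩)
    ([], 0) (Or.inl rfl)
  rw [List.foldl_map, List.foldl_map] at hmain
  have hF0 : FSt ([], 0) = ((0 : Int), (none : Option (List Int))) := rfl
  rw [hF0] at hmain
  obtain ⟨heq, hgood⟩ := hmain
  rw [heq]
  set res := (List.range 1024).foldl (fun st m => aBody n info st (lsbI 10 m)) ([], 0) with hres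
  rcases hgood with hnil | ⟨hlen, hent⟩
  · simp [FSt, hnil]
  · have hne : res.1 ≠ [] := by intro h; rw [h] at hlen; simp at hlen
    simp only [FSt, hne, if_false]
    rw [foldl_build_map]
    have hmap : (List.range 10).map
          (fun i => if res.1.getD i 0 == 0 then (0 : Int) else info.getD i 0 + 1)
        = (List.range 10).map
          (fun i => if res.1.getD i 0 == 1 then info.getD i 0 + 1 else (0 : Int)) := by
      apply List.map_congr_left
      intro i hi
      rcases hent i (List.mem_range.mp hi) with h | h <;>
        simp only [List.getD] at h <;> simp [h]
    rw [List.nil_append, hmap]
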